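-- pv_equiv track=rewrite | github.com/raunakjalan718/automated_book_publication | utils/rl_search.py | _get_state_key
-- ===== SOURCE A (Python) =====
-- from typing import List, Dict, Any, Callable, Optional
--
-- def _get_state_key(query: str, context: Optional[Dict[str, Any]] = None) -> str:
--     """Generate a state key from the query and context."""
--     if context is None:
--         return query
--
--     # Use relevant parts of context to define state
--     state_parts = [query]
--     for key in sorted(context.keys()):
--         if key in ['chapter_id', 'version_type']:
--             state_parts.append(f"{key}={context[key]}")
--
--     return "|".join(state_parts)
-- ===== SOURCE B (Python) =====
-- def _get_state_key(query, context=None):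
--     """Generate a state key from the query and context."""
--     if context is None:
--         return query
--     key = query
--     if 'chapter_id' in context:
--         key += f"|chapter_id={context['chapter_id']}"
--     if 'version_type' in context:
--         key += f"|version_type={context['version_type']}"
--     return key
-- ===== Notes on version B (the rewrite author's own statement) =====
-- stated objective: simpler
-- what changed: B builds the key by direct string concatenation with two membership tests (no intermediate list, no sort over all keys, no join), relying on 'chapter_id' < 'version_type' matching A's sorted order.
import Mathlib
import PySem

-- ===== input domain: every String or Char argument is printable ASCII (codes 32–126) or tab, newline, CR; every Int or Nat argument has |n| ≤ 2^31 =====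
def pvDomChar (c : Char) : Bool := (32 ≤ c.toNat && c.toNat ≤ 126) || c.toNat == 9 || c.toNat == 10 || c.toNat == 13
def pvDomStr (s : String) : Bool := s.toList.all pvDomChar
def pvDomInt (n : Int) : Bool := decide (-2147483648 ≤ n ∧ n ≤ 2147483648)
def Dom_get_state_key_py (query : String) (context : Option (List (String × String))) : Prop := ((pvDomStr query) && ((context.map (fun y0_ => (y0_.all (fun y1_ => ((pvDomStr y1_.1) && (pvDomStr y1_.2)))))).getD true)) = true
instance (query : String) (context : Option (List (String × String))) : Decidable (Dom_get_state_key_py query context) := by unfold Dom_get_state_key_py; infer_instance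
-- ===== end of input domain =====

-- B builds the key by direct string concatenation with two membership tests — no list,
-- no sort, no join (objective: simpler).

-- ===== PORT A =====
-- sorted(context.keys()), filter on membership in the literal list, append f"{key}={context[key]}",
-- then "|".join. context[key] is ported as Dict.getD d key "": exact, since key ranges over d.keys.
def get_state_key_py (query : String) (context : Option (List (String × String))) : String :=
  match context with
  | none => query
  | some ctx =>
    let d := PySem.Dict.ofList ctx
    let state_parts :=
      (PySem.List.sorted (PySem.Dict.keys d) (fun k => k) false).foldl
        (fun acc key =>
          if key ∈ (["chapter_id", "version_type"] : List String) then
            acc ++ [key ++ "=" ++ PySem.Dict.getD d key ""]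
          else acc) [query]
    PySem.Str.join "|" state_parts

-- ===== PORT B =====
-- key = query; two presence tests append "|chapter_id=…" / "|version_type=…" in place.
def get_state_key_py_alt (query : String) (context : Option (List (String × String))) : String :=
  match context with
  | none => query
  | some ctx =>
    let d := PySem.Dict.ofList ctx
    let key := query
    let key := if PySem.Dict.contains d "chapter_id" then
                 key ++ "|chapter_id=" ++ PySem.Dict.getD d "chapter_id" "" else key
    let key := if PySem.Dict.contains d "version_type" then
                 key ++ "|version_type=" ++ PySem.Dict.getD d "version_type" "" else key
    key

-- ===== PRECONDITION & SPEC =====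
def Spec_get_state_key_py (query : String) (context : Option (List (String × String))) (out : String) : Prop := out = get_state_key_py_alt query context
instance (query : String) (context : Option (List (String × String))) (out : String) : Decidable (Spec_get_state_key_py query context out) := by unfold Spec_get_state_key_py; infer_instance

-- ===== CLAIM (what is proved, stated in full; the proofs are below) =====
def Claim_equal_get_state_key_py : Prop := ∀ (query : String) (context : Option (List (String × String))), Dom_get_state_key_py query context → Spec_get_state_key_py query context (get_state_key_py query context)

-- ===== LEMMAS AND PROOFS =====

-- 'if p(x): out.append(f(x))' over a list, with a Prop test, is acc ++ map f (filter p l)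
theorem pv_foldl_append_if {α β : Type} (l : List α) (P : α → Prop) [DecidablePred P]
    (f : α → β) (acc : List β) :
    l.foldl (fun acc x => if P x then acc ++ [f x] else acc) acc
      = acc ++ (l.filter (fun x => decide (P x))).map f := by
  induction l generalizing acc with
  | nil => simp
  | cons x t ih =>
    by_cases h : P x <;> simp [List.foldl, h, ih]

-- core order fact: filtering the sorted keys down to the two literal keys yields the same
-- list as filtering the (alphabetical) literal list down to the present keys.
theorem pv_filter_sorted_eq (l : List String) (hnd : l.Nodup) :
    (PySem.List.sorted l (fun k => k) false).filter
        (fun k => decide (k ∈ (["chapter_id", "version_type"] : List String)))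
      = (["chapter_id", "version_type"] : List String).filter (fun k => decide (k ∈ l)) := by
  have hlit : List.Pairwise (· < ·) (["chapter_id", "version_type"] : List String) := by
    refine List.Pairwise.cons ?_ (List.pairwise_singleton _ _)
    intro b hb
    simp only [List.mem_singleton] at hb
    subst hb
    rw [String.lt_iff_toList_lt]
    decide
  set L := (PySem.List.sorted l (fun k => k) false).filter
      (fun k => decide (k ∈ (["chapter_id", "version_type"] : List String))) with hL
  set R := (["chapter_id", "version_type"] : List String).filter (fun k => decide (k ∈ l)) with hR
  have hperm : (PySem.List.sorted l (fun k => k) false).Perm l := PySem.List.sorted_perm l _ _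
  have hndL : L.Nodup := ((hperm.nodup_iff).mpr hnd).filter _
  have hndR : R.Nodup := by
    apply List.Nodup.filter
    exact List.Pairwise.imp ne_of_lt hlit
  have hsortL : L.Pairwise (· < ·) := by
    have hle : (PySem.List.sorted l (fun k => k) false).Pairwise (fun a b => a ≤ b) :=
      PySem.List.sorted_pairwise l (fun k => k)
    have := (hle.filter (p := fun k => decide (k ∈ (["chapter_id", "version_type"] : List String)))).and
      (List.nodup_iff_pairwise_ne.mp hndL)
    exact this.imp (fun h => lt_of_le_of_ne h.1 h.2)
  have hsortR : R.Pairwise (· < ·) := hlit.filter _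
  have hmem : ∀ x, x ∈ L ↔ x ∈ R := by
    intro x
    simp only [hL, hR, List.mem_filter, decide_eq_true_eq, hperm.mem_iff]
    tauto
  have hp : L.Perm R := (List.perm_ext_iff_of_nodup hndL hndR).mpr hmem
  exact hp.eq_of_pairwise (fun a b ha hb h1 h2 => absurd h2 (lt_asymm h1)) hsortL hsortR

-- join over 1-, 2- and 3-element lists, via Chars
theorem pv_join_one (a : String) : PySem.Str.join "|" [a] = a := by
  apply String.toList_injective
  simp [PySem.Str.toList_join, PySem.Chars.join, List.intercalate]

theorem pv_join_two (a b : String) : PySem.Str.join "|" [a, b] = a ++ "|" ++ b := by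
  apply String.toList_injective
  simp [PySem.Str.toList_join, PySem.Chars.join, List.intercalate]

theorem pv_join_three (a b c : String) :
    PySem.Str.join "|" [a, b, c] = a ++ "|" ++ b ++ "|" ++ c := by
  apply String.toList_injective
  simp [PySem.Str.toList_join, PySem.Chars.join, List.intercalate]

theorem get_state_key_main (query : String) (ctx : List (String × String)) :
    get_state_key_py query (some ctx) = get_state_key_py_alt query (some ctx) := by
  unfold get_state_key_py get_state_key_py_alt
  simp only
  rw [pv_foldl_append_if, pv_filter_sorted_eq _ (PySem.Dict.nodup_keys_ofList ctx)]
  have hc : ∀ k : String, decide (k ∈ PySem.Dict.keys (PySem.Dict.ofList ctx))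
      = PySem.Dict.contains (PySem.Dict.ofList ctx) k := by
    intro k; exact (PySem.Dict.contains_eq_decide_mem_keys _ _).symm
  by_cases h1 : PySem.Dict.contains (PySem.Dict.ofList ctx) "chapter_id" = true <;>
  by_cases h2 : PySem.Dict.contains (PySem.Dict.ofList ctx) "version_type" = true <;>
    simp only [List.filter, hc, h1, h2, Bool.false_eq_true, if_true, if_false, List.map,
      List.cons_append, List.nil_append, pv_join_one, pv_join_two, pv_join_three] <;>
    (apply String.toList_injective; simp)

-- ===== VERDICT (by name: the statement is the Claim_ definition above) =====
theorem get_state_key_py_spec : Claim_equal_get_state_key_py := by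
  intro query context _
  unfold Spec_get_state_key_py
  cases context with
  | none => rfl
  | some ctx => exact get_state_key_main query ctx
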